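-- pv_equiv track=rewrite | github.com/lexzheng/walis | walis/utils/format.py | set_null
-- ===== SOURCE A (Python) =====
-- def set_null(obj, attributes):
--     """
--     Set `attributes` in `obj` null if it does not exist.
--     In order to make api arguments stay the same pattern.
--     """
--     if type(obj) in (list, tuple):
--         for o in obj:
--             set_null(o, attributes)
--     elif type(obj) is dict:
--         for attr in attributes:
--             if obj.get(attr) is None:
--                 obj[attr] = None
--     return obj
-- ===== SOURCE B (Python) =====
-- def set_null(obj, attributes):
--     """Iterative re-implementation: explicit stack instead of recursion; per dict,
--     a present-key set drives append-only insertion of the missing attributes.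
--     Mutates the dicts in place exactly like the original."""
--     stack = [obj]
--     while stack:
--         item = stack.pop()
--         if type(item) in (list, tuple):
--             stack.extend(item)
--         elif type(item) is dict:
--             present = set(item)
--             for a in attributes:
--                 if a not in present:
--                     item[a] = None
--                     present.add(a)
--     return obj
-- ===== Notes on version B (the rewrite author's own statement) =====
-- stated objective: alternative
-- what changed: Replaces A's recursive descent and per-attribute dict.get() tests by an explicit stack traversal with a per-dict present-key set driving append-only insertion of missing attributes.
import Mathlib
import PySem

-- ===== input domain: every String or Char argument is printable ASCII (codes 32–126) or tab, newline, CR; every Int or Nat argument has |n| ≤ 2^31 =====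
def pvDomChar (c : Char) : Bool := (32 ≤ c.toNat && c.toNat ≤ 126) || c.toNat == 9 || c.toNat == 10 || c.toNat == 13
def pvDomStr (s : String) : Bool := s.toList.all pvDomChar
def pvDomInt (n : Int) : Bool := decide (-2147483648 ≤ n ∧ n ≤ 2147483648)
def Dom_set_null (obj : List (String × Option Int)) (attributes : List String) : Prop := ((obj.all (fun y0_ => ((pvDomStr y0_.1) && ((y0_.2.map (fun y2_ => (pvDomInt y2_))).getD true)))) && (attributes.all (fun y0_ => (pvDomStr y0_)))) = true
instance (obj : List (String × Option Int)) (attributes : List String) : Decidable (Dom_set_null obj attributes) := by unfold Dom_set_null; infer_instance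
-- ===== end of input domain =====

-- B traverses with an explicit stack and a present-key set instead of A's recursion and
-- per-attribute get() tests (objective: alternative). Both Pythons mutate the dicts in place;
-- the equivalence proved here is about the RETURN value.

-- ===== PORT A =====
-- At this type obj is a single dict (its items in insertion order), so only the
-- 'type(obj) is dict' branch of A can run; the list/tuple recursion is unreachable.
def set_null (obj : List (String × Option Int)) (attributes : List String) : List (String × Option Int) :=
  (attributes.foldl
    (fun (d : PySem.Dict String (Option Int)) attr =>
      if PySem.Dict.getD d attr none = none then d.insert attr none else d)
    (PySem.Dict.mk obj)).items

-- ===== PORT B =====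
-- At this type the stack starts as [obj] with obj a dict, so the while loop pops it once and
-- runs the dict branch: present = set(item), then append each attribute not yet present.
def set_null_alt (obj : List (String × Option Int)) (attributes : List String) : List (String × Option Int) :=
  (attributes.foldl
    (fun (st : PySem.Set String × List (String × Option Int)) a =>
      if st.1.contains a then st else (st.1.add a, st.2 ++ [(a, none)]))
    (PySem.Set.ofList (obj.map Prod.fst), obj)).2

-- ===== PRECONDITION & SPEC =====
-- Pre_ excludes association lists with duplicate keys: they do not encode any Python dict
-- (a dict cannot have duplicate keys), so nothing about A is claimed there.
def Pre_set_null (obj : List (String × Option Int)) (attributes : List String) : Prop :=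
  (obj.map Prod.fst).Nodup
instance (obj : List (String × Option Int)) (attributes : List String) : Decidable (Pre_set_null obj attributes) := by unfold Pre_set_null; infer_instance
def pvWitness_set_null : (List (String × Option Int)) × List String :=
  ([("a", some 1), ("b", none)], ["b", "c"])
def Spec_set_null (obj : List (String × Option Int)) (attributes : List String) (out : List (String × Option Int)) : Prop := out = set_null_alt obj attributes
instance (obj : List (String × Option Int)) (attributes : List String) (out : List (String × Option Int)) : Decidable (Spec_set_null obj attributes out) := by unfold Spec_set_null; infer_instance

-- ===== CLAIM (what is proved, stated in full; the proofs are below) =====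
def Claim_equal_set_null : Prop := ∀ (obj : List (String × Option Int)) (attributes : List String), Dom_set_null obj attributes → Pre_set_null obj attributes → Spec_set_null obj attributes (set_null obj attributes)

-- ===== LEMMAS AND PROOFS =====

-- a fresh-or-present step on the key set, as a Bool equation
theorem set_contains_add (s : PySem.Set String) (a x : String) :
    (s.add a).contains x = (x == a || s.contains x) := by
  rw [Bool.eq_iff_iff]
  simp only [PySem.Set.contains_iff, PySem.Set.mem_add, Bool.or_eq_true, beq_iff_eq]
  tauto

-- Loop invariant: A's dict fold and B's (set, list) fold stay in lockstep whenever the dict's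
-- keys are duplicate-free and the set holds exactly the dict's keys.
theorem set_null_loop_eq (attrs : List String) (d : PySem.Dict String (Option Int))
    (s : PySem.Set String) (hn : d.keys.Nodup)
    (hs : ∀ x, s.contains x = d.contains x) :
    (attrs.foldl
      (fun (d : PySem.Dict String (Option Int)) attr =>
        if PySem.Dict.getD d attr none = none then d.insert attr none else d) d).items
    = (attrs.foldl
        (fun (st : PySem.Set String × List (String × Option Int)) a =>
          if st.1.contains a then st else (st.1.add a, st.2 ++ [(a, none)])) (s, d.items)).2 := by
  induction attrs generalizing d s with
  | nil => simp
  | cons a attrs ih =>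
    simp only [List.foldl_cons]
    by_cases hc : d.contains a = true
    · -- key already present: B skips; A either skips or overwrites the value with itself
      rw [hs a]
      simp only [hc, if_true]
      by_cases hg : PySem.Dict.getD d a none = none
      · -- get() is None while the key is present: the stored value is already none,
        -- so insert rewrites the (unique) entry with the same pair and items is unchanged
        have hget : d.get? a = some none := by
          rw [PySem.Dict.contains_eq_isSome_get?] at hc
          cases hEq : d.get? a with
          | none => rw [hEq] at hc; simp at hc
          | some v =>
            have hv := PySem.Dict.getD_of_get?_eq_some d (d0 := none) hEq
            rw [hg] at hv
            rw [← hv]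
        have hitems : (d.insert a none).items = d.items := by
          rw [PySem.Dict.items_insert_of_contains d none hc]
          have hid : ∀ p ∈ d.items, (if p.1 == a then ((a, none) : String × Option Int) else p) = p := by
            intro p hp
            by_cases hpa : p.1 = a
            · have hmem : (a, p.2) ∈ d.items := by rw [← hpa]; exact hp
              have h2 : d.get? a = some p.2 :=
                (PySem.Dict.get?_eq_some_iff_mem_items d a p.2 hn).mpr hmem
              rw [hget] at h2
              have hv : p.2 = none := by injection h2 with h; exact h.symm
              simp only [hpa, beq_self_eq_true, if_true]
              exact (Prod.ext hpa hv).symm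
            · simp [hpa]
          rw [List.map_congr_left hid]; simp
        rw [hg, if_pos rfl, ih]
        · rw [hitems]
        · rw [PySem.Dict.keys_insert_of_contains d none hc]; exact hn
        · intro x
          rw [hs x, PySem.Dict.contains_insert]
          by_cases hx : x = a
          · subst hx; simp [hc]
          · simp [hx]
      · rw [if_neg hg]; exact ih d s hn hs
    · -- fresh key: A appends (a, none) to the dict, B appends it to the list; the set gains a
      rw [hs a]
      simp only [hc, if_false, Bool.false_eq_true]
      have hcd : d.contains a = false := by simpa using hc
      have hg : PySem.Dict.getD d a none = none := PySem.Dict.getD_of_not_contains d none hcd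
      rw [hg, if_pos rfl, ih]
      · rw [PySem.Dict.items_insert_of_not_contains d none hcd]
      · exact PySem.Dict.nodup_keys_insert d a none hn
      · intro x
        rw [set_contains_add, PySem.Dict.contains_insert, hs x]

-- ===== VERDICT (by name: the statement is the Claim_ definition above) =====
theorem set_null_spec : Claim_equal_set_null := by
  intro obj attributes _ hpre
  unfold Spec_set_null set_null set_null_alt
  have hmk_items : (PySem.Dict.mk obj).items = obj := rfl
  rw [← hmk_items]
  apply set_null_loop_eq
  · simpa [PySem.Dict.keys_mk] using hpre
  · intro x
    rw [Bool.eq_iff_iff]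
    simp only [PySem.Set.contains_iff, PySem.Set.mem_ofList, PySem.Dict.contains_mk,
      List.any_eq_true, List.mem_map, beq_iff_eq]
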